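-- pv_equiv track=rewrite | github.com/ivanlorenzetti/cial_test | cial_test/spiders/cialtest.py | phone_cleaning
-- ===== SOURCE A (Python) =====
-- def phone_cleaning(phone):
-- 	filtered_str = ''
-- 	allowed_chars = ['0','1','2','3','4','5','6','7','8','9','(',')','+']
-- 	for char in phone:
-- 		if char in allowed_chars:
-- 			filtered_str += char
-- 		else:
-- 			filtered_str += ''
--
-- 	return filtered_str
-- ===== SOURCE B (Python) =====
-- import re
--
-- def phone_cleaning(phone):
--     return re.sub(r'[^0-9()+]', '', phone)
-- ===== Notes on version B (the rewrite author's own statement) =====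
-- stated objective: idiomatic
-- what changed: Replaces the character-by-character accumulation loop with a single regex substitution deleting every character outside [0-9()+].
import Mathlib
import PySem

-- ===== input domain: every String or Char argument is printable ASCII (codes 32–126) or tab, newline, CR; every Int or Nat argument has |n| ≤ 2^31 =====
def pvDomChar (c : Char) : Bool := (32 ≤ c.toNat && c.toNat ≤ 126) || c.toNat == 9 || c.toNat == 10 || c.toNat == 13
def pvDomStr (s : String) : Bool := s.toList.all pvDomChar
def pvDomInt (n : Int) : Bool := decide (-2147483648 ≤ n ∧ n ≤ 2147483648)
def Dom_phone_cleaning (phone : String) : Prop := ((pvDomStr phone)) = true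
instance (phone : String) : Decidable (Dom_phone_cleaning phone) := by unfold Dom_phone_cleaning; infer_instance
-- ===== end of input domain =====

-- B replaces A's character-accumulation loop by one regex substitution deleting every char outside [0-9()+] (idiomatic).

-- ===== PORT A =====
-- Literal port of A: for-loop accumulating filtered_str, membership test against the allowed_chars list.
def pvAllowedChars : List Char :=
  ['0','1','2','3','4','5','6','7','8','9','(',')','+']

def phone_cleaning (phone : String) : String :=
  phone.toList.foldl
    (fun filtered_str char =>
      if char ∈ pvAllowedChars then filtered_str ++ char.toString
      else filtered_str ++ "")
    ""

-- ===== PORT B =====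
-- Port of re.sub(r'[^0-9()+]', '', phone): keep exactly the characters matching the class [0-9()+].
def pvInClass (c : Char) : Bool :=
  ('0' ≤ c && c ≤ '9') || c == '(' || c == ')' || c == '+'

def phone_cleaning_alt (phone : String) : String :=
  String.ofList (phone.toList.filter pvInClass)

-- ===== PRECONDITION & SPEC =====
def Spec_phone_cleaning (phone : String) (out : String) : Prop := out = phone_cleaning_alt phone
instance (phone : String) (out : String) : Decidable (Spec_phone_cleaning phone out) := by unfold Spec_phone_cleaning; infer_instance

-- ===== CLAIM (what is proved, stated in full; the proofs are below) =====
def Claim_equal_phone_cleaning : Prop := ∀ (phone : String), Dom_phone_cleaning phone → Spec_phone_cleaning phone (phone_cleaning phone)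

-- ===== LEMMAS AND PROOFS =====

theorem pv_mem_iff_class (c : Char) : (c ∈ pvAllowedChars) ↔ pvInClass c = true := by
  constructor
  · intro h
    fin_cases h <;> decide
  · intro h
    simp only [pvInClass, Bool.or_eq_true, Bool.and_eq_true, decide_eq_true_eq, beq_iff_eq] at h
    rcases h with ((⟨h1, h2⟩ | h) | h) | h
    · have hlo : 48 ≤ c.toNat := Nat.succ_le_of_lt h1
      have hhi : c.toNat ≤ 57 := h2
      interval_cases h : c.toNat <;> (rw [← Char.ofNat_toNat c, h]; decide)
    · subst h; decide
    · subst h; decide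
    · subst h; decide

theorem pv_foldl_filter (l : List Char) (acc : String) :
    l.foldl
      (fun filtered_str char =>
        if char ∈ pvAllowedChars then filtered_str ++ char.toString
        else filtered_str ++ "")
      acc
    = acc ++ String.ofList (l.filter pvInClass) := by
  induction l generalizing acc with
  | nil =>
    apply String.toList_injective; simp
  | cons c t ih =>
    simp only [List.foldl_cons, List.filter_cons]
    by_cases hc : c ∈ pvAllowedChars
    · have hb : pvInClass c = true := (pv_mem_iff_class c).mp hc
      rw [if_pos hc, hb, if_pos rfl, ih]
      apply String.toList_injective; simp
    · have hb : pvInClass c = false :=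
        Bool.not_eq_true _ ▸ (fun h => hc ((pv_mem_iff_class c).mpr h))
      rw [if_neg hc, hb]
      simp only [Bool.false_eq_true, if_false]
      rw [ih]
      apply String.toList_injective; simp

-- ===== VERDICT (by name: the statement is the Claim_ definition above) =====
theorem phone_cleaning_spec : Claim_equal_phone_cleaning := by
  intro phone _
  unfold Spec_phone_cleaning phone_cleaning phone_cleaning_alt
  rw [pv_foldl_filter]
  apply String.toList_injective; simp
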